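-- pv_equiv track=rewrite | github.com/xreyesso/sbi_pyt_project | ligsite_together.py | scan_along_axis
-- ===== SOURCE A (Python) =====
-- def scan_along_axis(voxel_grid, grid_dimensions, axis):
--     """
--     A sequence of voxels which starts with protein, followed by solvent and ending with protein is
--     called a protein-solvent-protein (PSP) event.
--     First, scan along the x, y and z axis to detect PSP events.
--     All values in between enclosing -1's are increased by 1 in each scan.
--     """
--
--     range_x, range_y, range_z = grid_dimensions
--
--     if axis == 'x':
--         scan_range = range(range_x)
--         dim1_range = range(range_y)
--         dim2_range = range(range_z)
--     elif axis == 'y':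
--         dim1_range = range(range_x)
--         scan_range = range(range_y)
--         dim2_range = range(range_z)
--     elif axis == 'z':
--         dim1_range = range(range_x)
--         dim2_range = range(range_y)
--         scan_range = range(range_z)
--     else:
--         raise ValueError("Axis must be 'x', 'y' or 'z'")
--
--     for i in dim1_range:
--         for j in dim2_range: # For all lines parallel to the indicated axis
--             solvent_voxels = None
--
--             for s in scan_range:
--                 if axis == 'x':
--                     key = (s, i, j)
--                 elif axis == 'y':
--                     key = (i, s, j)
--                 else:
--                     key = (i, j, s)
--
--                 if voxel_grid[key] == -1:
--                     if solvent_voxels is not None: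
--                         for key2 in solvent_voxels:
--                             voxel_grid[key2] += 1 # Add 1 for the solvent voxels in between protein voxels
--                     solvent_voxels = [] # Reset the solvent voxels list so we do not process them multiple times
--                 else:
--                     if solvent_voxels is not None:
--                         solvent_voxels.append(key) # Only keep track of solvent voxels if they come after a protein (occupied) voxel
--
--     return voxel_grid
-- ===== SOURCE B (Python) =====
-- def scan_along_axis(voxel_grid, grid_dimensions, axis):
--     """Boundary-pass re-implementation: per line, collect the protein (-1)
--     positions first, then bump every non-protein voxel strictly between the
--     first and the last protein position. Mutates voxel_grid in place."""
--     range_x, range_y, range_z = grid_dimensions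
--
--     if axis == 'x':
--         n, dim1, dim2 = range_x, range_y, range_z
--         make_key = lambda i, j, s: (s, i, j)
--     elif axis == 'y':
--         n, dim1, dim2 = range_y, range_x, range_z
--         make_key = lambda i, j, s: (i, s, j)
--     elif axis == 'z':
--         n, dim1, dim2 = range_z, range_x, range_y
--         make_key = lambda i, j, s: (i, j, s)
--     else:
--         raise ValueError("Axis must be 'x', 'y' or 'z'")
--
--     lines = [(i, j) for i in range(dim1) for j in range(dim2)]
--     for i, j in lines:
--         protein = [s for s in range(n) if voxel_grid[make_key(i, j, s)] == -1]
--         if len(protein) >= 2: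
--             for s in range(protein[0] + 1, protein[-1]):
--                 key = make_key(i, j, s)
--                 if voxel_grid[key] != -1:
--                     voxel_grid[key] += 1
--     return voxel_grid
-- ===== Notes on version B (the rewrite author's own statement) =====
-- stated objective: alternative
-- what changed: Replaces A's stateful accumulate-and-flush scan (an optional pending-solvent list reset at each protein voxel) by a per-line boundary pass: collect the protein (-1) positions first, then bump every non-protein voxel strictly between the first and the last protein position.
import Mathlib
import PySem

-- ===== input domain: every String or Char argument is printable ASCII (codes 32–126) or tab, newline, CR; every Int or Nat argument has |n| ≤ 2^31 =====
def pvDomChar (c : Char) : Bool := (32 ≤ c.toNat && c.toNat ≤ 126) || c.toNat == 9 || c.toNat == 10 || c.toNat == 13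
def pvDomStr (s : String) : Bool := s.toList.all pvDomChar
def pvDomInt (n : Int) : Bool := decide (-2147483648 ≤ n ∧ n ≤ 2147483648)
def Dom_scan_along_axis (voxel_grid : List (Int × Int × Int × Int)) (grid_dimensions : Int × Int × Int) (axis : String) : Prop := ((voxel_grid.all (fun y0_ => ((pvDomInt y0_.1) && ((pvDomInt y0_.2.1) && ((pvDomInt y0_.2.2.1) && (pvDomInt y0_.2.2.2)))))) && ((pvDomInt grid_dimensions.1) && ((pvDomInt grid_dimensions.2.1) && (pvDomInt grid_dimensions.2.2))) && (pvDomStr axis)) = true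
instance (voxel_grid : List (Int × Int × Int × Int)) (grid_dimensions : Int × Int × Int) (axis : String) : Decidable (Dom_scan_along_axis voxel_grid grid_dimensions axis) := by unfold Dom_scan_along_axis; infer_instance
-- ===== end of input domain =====

-- B replaces A's accumulate-and-flush scan by a per-line boundary pass (collect the -1 positions,
-- then bump the non-protein voxels strictly between the first and last one); same results, similar cost.
-- Both Pythons mutate the input dict in place and return it; the equivalence proved here is about the
-- returned dict (= the mutated dict itself).

-- shared type-convention bridge: the dict parameter arrives as a list of quadruples ((x,y,z) ↦ v);
-- dict(pairs) semantics (later duplicate keys overwrite in place) via PySem.Dict.ofList.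
def pvToDict (voxel_grid : List (Int × Int × Int × Int)) : PySem.Dict (Int × Int × Int) Int :=
  PySem.Dict.ofList (voxel_grid.map (fun q => ((q.1, q.2.1, q.2.2.1), q.2.2.2)))

def pvOfDict (d : PySem.Dict (Int × Int × Int) Int) : List (Int × Int × Int × Int) :=
  d.items.map (fun p => (p.1.1, p.1.2.1, p.1.2.2, p.2))

-- ===== PORT A =====
-- key = (s,i,j) / (i,s,j) / (i,j,s) depending on axis (the if-chain inside A's innermost loop)
def pvKeyOfA (axis : String) (i j s : Int) : Int × Int × Int :=
  if axis == "x" then (s, i, j) else if axis == "y" then (i, s, j) else (i, j, s)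

-- the innermost 'for s in scan_range' loop of A, with its (dict, solvent_voxels) state;
-- voxel_grid[key] reads are via getD 0 and '+= 1' via modify: Pre_ guarantees every key is
-- present, so the default 0 is never consulted on admitted inputs (Python would raise KeyError).
def pvLineA (axis : String) (i j : Int) (scanR : List Int)
    (d : PySem.Dict (Int × Int × Int) Int) : PySem.Dict (Int × Int × Int) Int :=
  (scanR.foldl
    (fun (st : PySem.Dict (Int × Int × Int) Int × Option (List (Int × Int × Int))) s =>
      let key := pvKeyOfA axis i j s
      if st.1.getD key 0 == -1 then
        (match st.2 with
         | some ks => ks.foldl (fun d k => d.modify k 0 (· + 1)) st.1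
         | none => st.1,
         some [])
      else
        (st.1, st.2.map (fun ks => ks ++ [key])))
    (d, none)).1

-- A's two outer loops 'for i in dim1_range: for j in dim2_range'
def pvScanA (axis : String) (d1 d2 n : Int)
    (d : PySem.Dict (Int × Int × Int) Int) : PySem.Dict (Int × Int × Int) Int :=
  (PySem.List.pyRange 0 d1 1).foldl
    (fun d i =>
      (PySem.List.pyRange 0 d2 1).foldl
        (fun d j => pvLineA axis i j (PySem.List.pyRange 0 n 1) d) d)
    d

def scan_along_axis (voxel_grid : List (Int × Int × Int × Int)) (grid_dimensions : Int × Int × Int) (axis : String) : List (Int × Int × Int × Int) :=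
  let d := pvToDict voxel_grid
  if axis == "x" then
    pvOfDict (pvScanA axis grid_dimensions.2.1 grid_dimensions.2.2 grid_dimensions.1 d)
  else if axis == "y" then
    pvOfDict (pvScanA axis grid_dimensions.1 grid_dimensions.2.2 grid_dimensions.2.1 d)
  else if axis == "z" then
    pvOfDict (pvScanA axis grid_dimensions.1 grid_dimensions.2.1 grid_dimensions.2.2 d)
  else
    voxel_grid  -- Python raises ValueError here; excluded by Pre_

-- ===== PORT B =====
-- one line of B: collect the protein positions, then bump every non-protein voxel strictly
-- between the first and last one (protein[0]/protein[-1] are safe: length ≥ 2 is checked)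
def pvLineB (key : Int → Int × Int × Int) (n : Int)
    (d : PySem.Dict (Int × Int × Int) Int) : PySem.Dict (Int × Int × Int) Int :=
  let protein := (PySem.List.pyRange 0 n 1).filter (fun s => d.getD (key s) 0 == -1)
  if 2 ≤ protein.length then
    (PySem.List.pyRange (protein.head! + 1) protein.getLast! 1).foldl
      (fun d s => if d.getD (key s) 0 != -1 then d.modify (key s) 0 (· + 1) else d) d
  else d

-- B's flat iteration over the precomputed list of lines
def pvScanB (key : Int → Int → Int → Int × Int × Int) (n d1 d2 : Int)
    (d : PySem.Dict (Int × Int × Int) Int) : PySem.Dict (Int × Int × Int) Int :=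
  let lines := (PySem.List.pyRange 0 d1 1).flatMap
    (fun i => (PySem.List.pyRange 0 d2 1).map (fun j => (i, j)))
  lines.foldl (fun d p => pvLineB (key p.1 p.2) n d) d

def scan_along_axis_alt (voxel_grid : List (Int × Int × Int × Int)) (grid_dimensions : Int × Int × Int) (axis : String) : List (Int × Int × Int × Int) :=
  let d := pvToDict voxel_grid
  if axis == "x" then
    pvOfDict (pvScanB (fun i j s => (s, i, j)) grid_dimensions.1 grid_dimensions.2.1 grid_dimensions.2.2 d)
  else if axis == "y" then
    pvOfDict (pvScanB (fun i j s => (i, s, j)) grid_dimensions.2.1 grid_dimensions.1 grid_dimensions.2.2 d)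
  else if axis == "z" then
    pvOfDict (pvScanB (fun i j s => (i, j, s)) grid_dimensions.2.2 grid_dimensions.1 grid_dimensions.2.1 d)
  else
    voxel_grid  -- Python raises ValueError here; excluded by Pre_

-- ===== PRECONDITION & SPEC =====
-- Pre_ = exactly the inputs on which Python A returns: a valid axis, and every coordinate of the
-- declared grid present as a key of the dict (otherwise A raises ValueError / KeyError).
def Pre_scan_along_axis (voxel_grid : List (Int × Int × Int × Int)) (grid_dimensions : Int × Int × Int) (axis : String) : Prop :=
  (axis = "x" ∨ axis = "y" ∨ axis = "z") ∧
  ∀ x ∈ PySem.List.pyRange 0 grid_dimensions.1 1,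
    ∀ y ∈ PySem.List.pyRange 0 grid_dimensions.2.1 1,
      ∀ z ∈ PySem.List.pyRange 0 grid_dimensions.2.2 1,
        (x, y, z) ∈ voxel_grid.map (fun q => (q.1, q.2.1, q.2.2.1))
instance (voxel_grid : List (Int × Int × Int × Int)) (grid_dimensions : Int × Int × Int) (axis : String) : Decidable (Pre_scan_along_axis voxel_grid grid_dimensions axis) := by unfold Pre_scan_along_axis; infer_instance

def pvWitness_scan_along_axis : (List (Int × Int × Int × Int)) × (Int × Int × Int) × String :=
  ([(0, 0, 0, -1), (1, 0, 0, 5), (2, 0, 0, -1)], (3, 1, 1), "x")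

def Spec_scan_along_axis (voxel_grid : List (Int × Int × Int × Int)) (grid_dimensions : Int × Int × Int) (axis : String) (out : List (Int × Int × Int × Int)) : Prop := out = scan_along_axis_alt voxel_grid grid_dimensions axis
instance (voxel_grid : List (Int × Int × Int × Int)) (grid_dimensions : Int × Int × Int) (axis : String) (out : List (Int × Int × Int × Int)) : Decidable (Spec_scan_along_axis voxel_grid grid_dimensions axis out) := by unfold Spec_scan_along_axis; infer_instance

-- ===== CLAIM (what is proved, stated in full; the proofs are below) =====
def Claim_equal_scan_along_axis : Prop := ∀ (voxel_grid : List (Int × Int × Int × Int)) (grid_dimensions : Int × Int × Int) (axis : String), Dom_scan_along_axis voxel_grid grid_dimensions axis → Pre_scan_along_axis voxel_grid grid_dimensions axis → Spec_scan_along_axis voxel_grid grid_dimensions axis (scan_along_axis voxel_grid grid_dimensions axis)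

-- ===== LEMMAS AND PROOFS =====

-- proof-side abbreviation of the '+= 1' loop both lines reduce to
def pvBump (ks : List (Int × Int × Int)) (d : PySem.Dict (Int × Int × Int) Int) :
    PySem.Dict (Int × Int × Int) Int :=
  ks.foldl (fun d k => d.modify k 0 (· + 1)) d

-- pure mirror of A's per-line state machine: the sequence of scan positions it bumps
def pvPlanA (f : Int → Bool) : List Int → Option (List Int) → List Int
  | [], _ => []
  | s :: l, acc =>
    if f s then (acc.getD []) ++ pvPlanA f l (some [])
    else pvPlanA f l (acc.map (· ++ [s]))

theorem pvBump_getD_notmem (ks : List (Int × Int × Int)) (d : PySem.Dict (Int × Int × Int) Int)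
    (k : Int × Int × Int) (hk : k ∉ ks) : (pvBump ks d).getD k 0 = d.getD k 0 := by
  induction ks generalizing d with
  | nil => rfl
  | cons a t ih =>
    simp only [List.mem_cons, not_or] at hk
    rw [pvBump, List.foldl_cons, ← pvBump, ih _ hk.2, PySem.Dict.getD_modify_of_ne _ _ _ hk.1]

theorem pvBump_append (a b : List (Int × Int × Int)) (d : PySem.Dict (Int × Int × Int) Int) :
    pvBump (a ++ b) d = pvBump b (pvBump a d) := by
  simp [pvBump, List.foldl_append]

theorem pvGA (key : Int → Int × Int × Int) (hinj : Function.Injective key) (v : Int → Int)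
    (l : List Int) (acc : Option (List Int)) (d : PySem.Dict (Int × Int × Int) Int)
    (hnd : l.Nodup)
    (hdisj : ∀ a ∈ acc.getD [], ∀ s ∈ l, a ≠ s)
    (hread : ∀ s ∈ l, d.getD (key s) 0 = v s) :
    (l.foldl
      (fun (st : PySem.Dict (Int × Int × Int) Int × Option (List (Int × Int × Int))) s =>
        if st.1.getD (key s) 0 == -1 then
          (match st.2 with
           | some ks => ks.foldl (fun d k => d.modify k 0 (· + 1)) st.1
           | none => st.1,
           some [])
        else (st.1, st.2.map (fun ks => ks ++ [key s])))
      (d, acc.map (List.map key))).1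
    = pvBump ((pvPlanA (fun s => v s == -1) l acc).map key) d := by
  induction l generalizing acc d with
  | nil => simp [pvPlanA, pvBump]
  | cons s t ih =>
    rw [List.nodup_cons] at hnd
    have hv : d.getD (key s) 0 = v s := hread s List.mem_cons_self
    have hread' : ∀ u ∈ t, d.getD (key u) 0 = v u := fun u hu => hread u (List.mem_cons_of_mem _ hu)
    rw [List.foldl_cons]
    by_cases hf : (v s == -1) = true
    · rcases acc with _ | a
      · simp only [Option.map_none, hv, hf, if_true]
        have iheq := ih (some []) d hnd.2 (by simp) hread'
        simp only [Option.map_some, List.map_nil] at iheq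
        rw [iheq]
        simp [pvPlanA, hf]
      · simp only [Option.map_some, hv, hf, if_true]
        have hread'' : ∀ u ∈ t, (pvBump (a.map key) d).getD (key u) 0 = v u := by
          intro u hu
          rw [pvBump_getD_notmem]
          · exact hread' u hu
          · intro hc
            obtain ⟨x, hx, hxe⟩ := List.mem_map.mp hc
            exact hdisj x (by simpa using hx) u (List.mem_cons_of_mem _ hu) (hinj hxe)
        have iheq := ih (some []) (pvBump (a.map key) d) hnd.2 (by simp) hread''
        simp only [Option.map_some, List.map_nil, pvBump] at iheq
        rw [iheq]
        simp only [pvPlanA, hf, if_true, Option.getD_some, List.map_append]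
        rw [pvBump_append]
        simp [pvBump]
    · rcases acc with _ | a
      · simp only [Option.map_none, hv, hf, Bool.false_eq_true, if_false]
        have iheq := ih none d hnd.2 (by simp) hread'
        simp only [Option.map_none] at iheq
        rw [iheq]
        simp [pvPlanA, hf]
      · simp only [Option.map_some, hv, hf, Bool.false_eq_true, if_false]
        have hdisj' : ∀ x ∈ (some (a ++ [s])).getD [], ∀ u ∈ t, x ≠ u := by
          intro x hx u hu
          simp only [Option.getD_some, List.mem_append, List.mem_singleton] at hx
          rcases hx with hx | rfl
          · exact hdisj x (by simpa using hx) u (List.mem_cons_of_mem _ hu)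
          · exact fun he => hnd.1 (he ▸ hu)
        have iheq := ih (some (a ++ [s])) d hnd.2 hdisj' hread'
        simp only [Option.map_some, List.map_append, List.map_cons, List.map_nil] at iheq
        rw [iheq]
        simp [pvPlanA, hf]

theorem pvGB (key : Int → Int × Int × Int) (hinj : Function.Injective key) (v : Int → Int)
    (l : List Int) (d : PySem.Dict (Int × Int × Int) Int)
    (hnd : l.Nodup)
    (hread : ∀ s ∈ l, d.getD (key s) 0 = v s) :
    l.foldl (fun d s => if d.getD (key s) 0 != -1 then d.modify (key s) 0 (· + 1) else d) d
    = pvBump ((l.filter (fun s => !(v s == -1))).map key) d := by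
  induction l generalizing d with
  | nil => rfl
  | cons s t ih =>
    rw [List.nodup_cons] at hnd
    have hv : d.getD (key s) 0 = v s := hread s List.mem_cons_self
    have hread' : ∀ u ∈ t, d.getD (key u) 0 = v u := fun u hu => hread u (List.mem_cons_of_mem _ hu)
    rw [List.foldl_cons, hv]
    by_cases hf : (v s == -1) = true
    · rw [if_neg (by simp [bne, hf]), List.filter_cons_of_neg (by simp [hf]),
        ih _ hnd.2 hread']
    · rw [if_pos (by simp [bne, hf]), List.filter_cons_of_pos (by simp [hf])]
      have hread'' : ∀ u ∈ t, (d.modify (key s) 0 (· + 1)).getD (key u) 0 = v u := by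
        intro u hu
        rw [PySem.Dict.getD_modify_of_ne _ _ _
          (fun hc => hnd.1 (by rwa [hinj hc] at hu)), hread' u hu]
      rw [ih _ hnd.2 hread'']
      rfl

theorem pvA1 (f : Int → Bool) (l : List Int) (a : List Int) :
    pvPlanA f l (some a) = (if l.any f then a else []) ++ pvPlanA f l (some []) := by
  induction l generalizing a with
  | nil => simp [pvPlanA]
  | cons s t ih =>
    by_cases hf : f s
    · simp [pvPlanA, hf]
    · simp only [pvPlanA, hf, if_false, Bool.false_eq_true, Option.map_some, List.nil_append,
        List.any_cons, Bool.false_or]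
      rw [ih, ih [s]]
      by_cases ha : t.any f <;> simp [ha, List.append_assoc]

theorem pvS2e (f : Int → Bool) (l : List Int) (h : l.filter f = []) :
    pvPlanA f l (some []) = [] := by
  induction l with
  | nil => rfl
  | cons s t ih =>
    rw [List.filter_cons] at h
    by_cases hf : f s
    · simp [hf] at h
    · simp only [hf, Bool.false_eq_true, if_false] at h
      have hany : t.any f = false := by
        by_contra hc
        simp only [Bool.not_eq_false, List.any_eq_true] at hc
        obtain ⟨x, hx, hfx⟩ := hc
        have : x ∈ t.filter f := List.mem_filter.mpr ⟨hx, hfx⟩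
        simp [h] at this
      simp only [pvPlanA, hf, if_false, Bool.false_eq_true, Option.map_some, List.nil_append]
      rw [pvA1, hany, ih h]
      simp

theorem pvS2 (f : Int → Bool) (l : List Int) (hp : l.Pairwise (· < ·)) (hi : Int)
    (hh : (l.filter f).getLast? = some hi) :
    pvPlanA f l (some []) = l.filter (fun s => !f s && decide (s < hi)) := by
  induction l with
  | nil => simp at hh
  | cons s t ih =>
    rw [List.pairwise_cons] at hp
    obtain ⟨hs, hp'⟩ := hp
    by_cases hf : f s
    · rw [List.filter_cons_of_pos hf] at hh
      rcases hft : t.filter f with _ | ⟨b, u⟩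
      · rw [hft] at hh
        simp only [List.getLast?_singleton, Option.some.injEq] at hh
        subst hh
        simp only [pvPlanA, hf, if_true, Option.getD_some, List.nil_append]
        rw [pvS2e f t hft, List.filter_cons_of_neg (by simp [hf])]
        symm
        rw [List.filter_eq_nil_iff]
        intro x hx
        have := hs x hx
        simp [not_lt.mpr (le_of_lt this)]
      · rw [hft, List.getLast?_cons_cons, ← hft] at hh
        simp only [pvPlanA, hf, if_true, Option.getD_some, List.nil_append]
        rw [ih hp' hh, List.filter_cons_of_neg (by simp [hf])]
    · rw [List.filter_cons_of_neg (by simp [hf])] at hh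
      have hne : t.filter f ≠ [] := by
        intro hc; rw [hc] at hh; simp at hh
      have hany : t.any f = true := by
        rcases hft : t.filter f with _ | ⟨b, u⟩
        · exact absurd hft hne
        · have hb : b ∈ t.filter f := by rw [hft]; exact List.mem_cons_self
          rw [List.mem_filter] at hb
          exact List.any_eq_true.mpr ⟨b, hb.1, hb.2⟩
      have hhi_mem : hi ∈ t := by
        have := List.mem_of_getLast? hh
        exact (List.mem_filter.mp this).1
      simp only [pvPlanA, hf, if_false, Bool.false_eq_true, Option.map_some, List.nil_append]
      rw [pvA1, hany, if_pos rfl, ih hp' hh,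
        List.filter_cons_of_pos (by simp [hf, hs hi hhi_mem])]
      simp

theorem pvS0e (f : Int → Bool) (l : List Int) (hp : l.Pairwise (· < ·))
    (h : (l.filter f).length ≤ 1) : pvPlanA f l none = [] := by
  induction l with
  | nil => rfl
  | cons s t ih =>
    rw [List.pairwise_cons] at hp
    by_cases hf : f s
    · rw [List.filter_cons_of_pos hf] at h
      simp only [List.length_cons] at h
      have hft : t.filter f = [] := List.length_eq_zero_iff.mp (by omega)
      simp only [pvPlanA, hf, if_true, Option.getD_none, List.nil_append]
      exact pvS2e f t hft
    · rw [List.filter_cons_of_neg (by simp [hf])] at h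
      simp only [pvPlanA, hf, if_false, Bool.false_eq_true, Option.map_none]
      exact ih hp.2 h

theorem pvS0 (f : Int → Bool) (l : List Int) (hp : l.Pairwise (· < ·)) (lo hi : Int)
    (hlo : (l.filter f).head? = some lo) (hhi : (l.filter f).getLast? = some hi)
    (h2 : 2 ≤ (l.filter f).length) :
    pvPlanA f l none = l.filter (fun s => !f s && decide (lo < s) && decide (s < hi)) := by
  induction l with
  | nil => simp at hlo
  | cons s t ih =>
    rw [List.pairwise_cons] at hp
    obtain ⟨hs, hp'⟩ := hp
    by_cases hf : f s
    · rw [List.filter_cons_of_pos hf] at hlo hhi h2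
      simp only [List.head?_cons, Option.some.injEq] at hlo
      subst hlo
      rcases hft : t.filter f with _ | ⟨b, u⟩
      · rw [hft] at h2; simp at h2
      · rw [hft, List.getLast?_cons_cons, ← hft] at hhi
        simp only [pvPlanA, hf, if_true, Option.getD_none, List.nil_append]
        rw [pvS2 f t hp' hi hhi, List.filter_cons_of_neg (by simp [hf])]
        apply List.filter_congr
        intro x hx
        simp [hs x hx]
    · rw [List.filter_cons_of_neg (by simp [hf])] at hlo hhi h2
      have hlo_mem : lo ∈ t := (List.mem_filter.mp (List.mem_of_mem_head? hlo)).1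
      simp only [pvPlanA, hf, if_false, Bool.false_eq_true, Option.map_none]
      rw [ih hp' hlo hhi h2, List.filter_cons_of_neg]
      simp [hf, not_lt.mpr (le_of_lt (hs lo hlo_mem))]

theorem pvRangeFilter (f : Int → Bool) (n lo hi : Int)
    (hlo : lo ∈ PySem.List.pyRange 0 n 1) (hhi : hi ∈ PySem.List.pyRange 0 n 1)
    (hlt : lo < hi) :
    (PySem.List.pyRange (lo + 1) hi 1).filter (fun s => !f s)
    = (PySem.List.pyRange 0 n 1).filter (fun s => !f s && decide (lo < s) && decide (s < hi)) := by
  rw [PySem.List.mem_pyRange_one] at hlo hhi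
  rw [PySem.List.pyRange_one_append 0 (lo + 1) n (by omega) (by omega),
    PySem.List.pyRange_one_append (lo + 1) hi n (by omega) (by omega),
    List.filter_append, List.filter_append]
  have h1 : (PySem.List.pyRange 0 (lo + 1)).filter
      (fun s => !f s && decide (lo < s) && decide (s < hi)) = [] := by
    rw [List.filter_eq_nil_iff]
    intro x hx
    rw [PySem.List.mem_pyRange_one] at hx
    simp [not_lt.mpr (by omega : x ≤ lo)]
  have h3 : (PySem.List.pyRange hi n).filter
      (fun s => !f s && decide (lo < s) && decide (s < hi)) = [] := by
    rw [List.filter_eq_nil_iff]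
    intro x hx
    rw [PySem.List.mem_pyRange_one] at hx
    simp [not_lt.mpr (by omega : hi ≤ x)]
  have h2 : (PySem.List.pyRange (lo + 1) hi).filter
      (fun s => !f s && decide (lo < s) && decide (s < hi))
      = (PySem.List.pyRange (lo + 1) hi).filter (fun s => !f s) := by
    apply List.filter_congr
    intro x hx
    rw [PySem.List.mem_pyRange_one] at hx
    simp [show lo < x by omega, show x < hi by omega]
  rw [h1, h2, h3]
  simp

theorem pvKeyOfA_inj (axis : String) (i j : Int) :
    Function.Injective (fun s => pvKeyOfA axis i j s) := by
  intro a b h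
  simp only [pvKeyOfA] at h
  split_ifs at h <;> simp_all [Prod.ext_iff]

theorem pvPlanFilter (f : Int → Bool) (n : Int) :
    pvPlanA f (PySem.List.pyRange 0 n 1) none
    = if 2 ≤ ((PySem.List.pyRange 0 n 1).filter f).length then
        (PySem.List.pyRange (((PySem.List.pyRange 0 n 1).filter f).head! + 1)
          ((PySem.List.pyRange 0 n 1).filter f).getLast! 1).filter (fun s => !f s)
      else [] := by
  by_cases h2 : 2 ≤ ((PySem.List.pyRange 0 n 1).filter f).length
  · rw [if_pos h2]
    obtain ⟨p, tP, hPe⟩ := List.exists_cons_of_ne_nil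
      (show (PySem.List.pyRange 0 n 1).filter f ≠ [] by
        intro hc; rw [hc] at h2; simp at h2)
    have htne : tP ≠ [] := by
      intro hc; rw [hPe, hc] at h2; simp at h2
    obtain ⟨b, uP, htPe⟩ := List.exists_cons_of_ne_nil htne
    subst htPe
    have hlastbang : (p :: b :: uP).getLast! = (b :: uP).getLast (List.cons_ne_nil b uP) := by
      rw [List.getLast!_eq_getLast?_getD, List.getLast?_cons_cons,
        List.getLast?_eq_some_getLast (List.cons_ne_nil b uP)]
      rfl
    have hhimem : (b :: uP).getLast (List.cons_ne_nil b uP) ∈ b :: uP := List.getLast_mem _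
    have hpmem_f : p ∈ (PySem.List.pyRange 0 n 1).filter f := by
      rw [hPe]; exact List.mem_cons_self
    have hhimem_f : (b :: uP).getLast (List.cons_ne_nil b uP) ∈ (PySem.List.pyRange 0 n 1).filter f := by
      rw [hPe]; exact List.mem_cons_of_mem _ hhimem
    have hprng : p ∈ PySem.List.pyRange 0 n 1 := (List.mem_filter.mp hpmem_f).1
    have hhirng : (b :: uP).getLast (List.cons_ne_nil b uP) ∈ PySem.List.pyRange 0 n 1 :=
      (List.mem_filter.mp hhimem_f).1
    have hpwf : ((PySem.List.pyRange 0 n 1).filter f).Pairwise (· < ·) :=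
      List.Pairwise.filter _ (PySem.List.pairwise_lt_pyRange_one 0 n)
    have hplt : p < (b :: uP).getLast (List.cons_ne_nil b uP) := by
      rw [hPe, List.pairwise_cons] at hpwf
      exact hpwf.1 _ hhimem
    have hlast? : ((PySem.List.pyRange 0 n 1).filter f).getLast?
        = some ((b :: uP).getLast (List.cons_ne_nil b uP)) := by
      rw [hPe, List.getLast?_cons_cons, List.getLast?_eq_some_getLast (List.cons_ne_nil b uP)]
    have hhead? : ((PySem.List.pyRange 0 n 1).filter f).head? = some p := by
      rw [hPe]; rfl
    rw [pvS0 f _ (PySem.List.pairwise_lt_pyRange_one 0 n) p _ hhead? hlast? h2,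
      hPe, hlastbang]
    have hheadbang : (p :: b :: uP).head! = p := rfl
    rw [hheadbang]
    exact (pvRangeFilter f n p _ hprng hhirng hplt).symm
  · rw [if_neg h2]
    exact pvS0e f _ (PySem.List.pairwise_lt_pyRange_one 0 n) (by omega)

theorem pvLineAB (key : Int → Int × Int × Int) (hinj : Function.Injective key)
    (n : Int) (d : PySem.Dict (Int × Int × Int) Int) :
    ((PySem.List.pyRange 0 n 1).foldl
      (fun (st : PySem.Dict (Int × Int × Int) Int × Option (List (Int × Int × Int))) s =>
        if st.1.getD (key s) 0 == -1 then
          (match st.2 with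
           | some ks => ks.foldl (fun d k => d.modify k 0 (· + 1)) st.1
           | none => st.1,
           some [])
        else (st.1, st.2.map (fun ks => ks ++ [key s])))
      (d, none)).1
    = pvLineB key n d := by
  have hga := pvGA key hinj (fun s => d.getD (key s) 0) (PySem.List.pyRange 0 n 1) none d
    (PySem.List.nodup_pyRange_one 0 n) (by simp) (fun s _ => rfl)
  simp only [Option.map_none] at hga
  rw [hga, pvPlanFilter]
  simp only [pvLineB]
  by_cases h2 : 2 ≤ ((PySem.List.pyRange 0 n 1).filter (fun s => d.getD (key s) 0 == -1)).length
  · rw [if_pos h2, if_pos h2]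
    rw [pvGB key hinj (fun s => d.getD (key s) 0) _ d
      (PySem.List.nodup_pyRange_one _ _) (fun s _ => rfl)]
  · rw [if_neg h2, if_neg h2]
    rfl

theorem pvFoldlFlatMap {α β γ : Type} (l : List α) (g : α → List β) (f : γ → β → γ) (init : γ) :
    (l.flatMap g).foldl f init = l.foldl (fun acc x => (g x).foldl f acc) init := by
  induction l generalizing init with
  | nil => rfl
  | cons a t ih => simp [List.flatMap_cons, List.foldl_append, ih]

theorem pvLineA_eq (axis : String) (i j : Int) (scanR : List Int)
    (d : PySem.Dict (Int × Int × Int) Int) :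
    pvLineA axis i j scanR d
    = (scanR.foldl
      (fun (st : PySem.Dict (Int × Int × Int) Int × Option (List (Int × Int × Int))) s =>
        if st.1.getD (pvKeyOfA axis i j s) 0 == -1 then
          (match st.2 with
           | some ks => ks.foldl (fun d k => d.modify k 0 (· + 1)) st.1
           | none => st.1,
           some [])
        else (st.1, st.2.map (fun ks => ks ++ [pvKeyOfA axis i j s])))
      (d, none)).1 := rfl

theorem pvScanAB (axis : String) (key : Int → Int → Int → Int × Int × Int)
    (hk : ∀ i j s, pvKeyOfA axis i j s = key i j s) (n d1 d2 : Int)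
    (d : PySem.Dict (Int × Int × Int) Int) :
    pvScanA axis d1 d2 n d = pvScanB key n d1 d2 d := by
  have hline : ∀ (i j : Int) (d : PySem.Dict (Int × Int × Int) Int),
      pvLineA axis i j (PySem.List.pyRange 0 n 1) d = pvLineB (key i j) n d := by
    intro i j d
    rw [pvLineA_eq]
    have h := pvLineAB (fun s => pvKeyOfA axis i j s) (pvKeyOfA_inj axis i j) n d
    exact h.trans (by rw [show (fun s => pvKeyOfA axis i j s) = key i j from funext fun s => hk i j s])
  simp only [pvScanA, pvScanB]
  rw [pvFoldlFlatMap]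
  congr 1
  funext d i
  rw [List.foldl_map]
  congr 1
  funext d j
  exact hline i j d

-- ===== VERDICT (by name: the statement is the Claim_ definition above) =====
theorem scan_along_axis_spec : Claim_equal_scan_along_axis := by
  intro vg dims axis hdom hpre
  obtain ⟨hax, -⟩ := hpre
  unfold Spec_scan_along_axis scan_along_axis scan_along_axis_alt
  rcases hax with rfl | rfl | rfl
  · simp only []
    rw [if_pos (show (("x" : String) == "x") = true from rfl),
      if_pos (show (("x" : String) == "x") = true from rfl)]
    exact congrArg pvOfDict
      (pvScanAB "x" (fun i j s => (s, i, j)) (fun i j s => by simp [pvKeyOfA])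
        dims.1 dims.2.1 dims.2.2 (pvToDict vg))
  · simp only []
    rw [if_neg (show ¬ ((("y" : String) == "x") = true) by decide),
      if_pos (show (("y" : String) == "y") = true from rfl),
      if_neg (show ¬ ((("y" : String) == "x") = true) by decide),
      if_pos (show (("y" : String) == "y") = true from rfl)]
    exact congrArg pvOfDict
      (pvScanAB "y" (fun i j s => (i, s, j)) (fun i j s => by simp [pvKeyOfA])
        dims.2.1 dims.1 dims.2.2 (pvToDict vg))
  · simp only []
    rw [if_neg (show ¬ ((("z" : String) == "x") = true) by decide),
      if_neg (show ¬ ((("z" : String) == "y") = true) by decide),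
      if_pos (show (("z" : String) == "z") = true from rfl),
      if_neg (show ¬ ((("z" : String) == "x") = true) by decide),
      if_neg (show ¬ ((("z" : String) == "y") = true) by decide),
      if_pos (show (("z" : String) == "z") = true from rfl)]
    exact congrArg pvOfDict
      (pvScanAB "z" (fun i j s => (i, j, s)) (fun i j s => by simp [pvKeyOfA])
        dims.2.2 dims.1 dims.2.1 (pvToDict vg))
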